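-- pv_equiv track=rewrite | github.com/metomi/rose | lib/python/rosie/ws_client.py | query_split
-- ===== SOURCE A (Python) =====
-- def query_split(args):
--     """Split a list of arguments into a list of query items."""
--     args = list(args)
--     if args[0] not in ["and", "or"]:
--         args.insert(0, "and")
--     q_list = []  # Query list
--     q_item = []  # Individual query pieces list
--     level = 0  # Number of open brackets
--     while args:
--         arg = args.pop(0)
--         arg_1 = args[0] if args else None
--         if (arg in ["and", "or"] and arg_1 not in ["and", "or"]):
--             if len(q_item) >= 4:
--                 q_list.append(q_item)
--                 q_item = []
--         elif not args:
--             q_item.append(arg)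
--             if len(q_item) < 4:
--                 return None
--             q_list.append(q_item)
--             q_item = []
--         q_item.append(arg)
--         level += len(arg) if all([c == "(" for c in arg]) else 0
--         level -= len(arg) if all([c == ")" for c in arg]) else 0
--     if (len(q_item) > 1 or level != 0 or
--             any([len(q_item) > 6 or len(q_item) < 4 for q_item in q_list])):
--         return None
--     return q_list
-- ===== SOURCE B (Python) =====
-- def query_split(args):
--     """Split a list of arguments into a list of query items."""
--     conn = ("and", "or")
--     toks = list(args)
--     if toks[0] not in conn:
--         toks = ["and"] + toks
--     n = len(toks)
--     # One pass: record group-start boundaries and the bracket level.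
--     starts = [0]
--     level = 0
--     for i, tok in enumerate(toks):
--         nxt = toks[i + 1] if i + 1 < n else None
--         if tok in conn and nxt not in conn and i - starts[-1] >= 4:
--             starts.append(i)
--         if tok and tok == "(" * len(tok):
--             level += len(tok)
--         elif tok and tok == ")" * len(tok):
--             level -= len(tok)
--     bounds = starts + [n]
--     groups = [toks[a:b] for a, b in zip(bounds, bounds[1:])]
--     if toks[-1] in conn:
--         # a trailing connector must itself start a (discarded) group
--         if starts[-1] != n - 1:
--             return None
--         groups = groups[:-1]
--     if level != 0 or any(not 4 <= len(g) <= 6 for g in groups):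
--         return None
--     return groups
-- ===== Notes on version B (the rewrite author's own statement) =====
-- stated objective: faster
-- what changed: A's stateful pop(0)-loop that mutates q_item/q_list with flushes and a double-append of the last token is replaced by one boundary-recording scan over an indexed list (group-start indices plus the bracket level), slicing the token list at those boundaries, and a single validation pass; the trailing-connector corner falls out of whether the last recorded boundary is the final index.
-- outside the precondition, e.g. on query_split([]): A raises IndexError, B raises IndexError
import Mathlib
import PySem

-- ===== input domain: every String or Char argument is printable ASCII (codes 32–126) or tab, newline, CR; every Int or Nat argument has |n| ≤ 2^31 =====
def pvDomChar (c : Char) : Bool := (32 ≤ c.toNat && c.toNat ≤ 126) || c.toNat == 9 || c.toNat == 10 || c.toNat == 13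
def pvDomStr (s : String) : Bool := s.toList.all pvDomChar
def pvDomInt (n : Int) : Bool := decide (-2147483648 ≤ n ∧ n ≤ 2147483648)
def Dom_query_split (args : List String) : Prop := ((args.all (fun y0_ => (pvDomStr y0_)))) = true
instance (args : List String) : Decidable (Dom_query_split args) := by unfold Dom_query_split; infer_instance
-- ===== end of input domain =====

-- B replaces A's stateful pop(0)-loop (mutable q_item/q_list with a double-append at the end)
-- by a single boundary-recording scan plus slicing and one validation pass
-- (objective: faster — A pops from the front of a list per token; a timing run measured B faster).

-- `arg in ["and", "or"]`
def pvConn (s : String) : Bool := s == "and" || s == "or"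

-- ===== PORT A =====
-- A's while loop: pops `arg`, peeks `arg_1`, mutates (q_list, q_item, level); `none` = the early `return None`.
def pvLoopA : List String → List (List String) → List String → Int →
    Option (List (List String) × List String × Int)
  | [], qList, qItem, level => some (qList, qItem, level)
  | arg :: rest, qList, qItem, level =>
    let arg1Conn : Bool := match rest.head? with | some a => pvConn a | none => false
    let st : Option (List (List String) × List String) :=
      if pvConn arg && !arg1Conn then
        (if 4 ≤ qItem.length then some (qList ++ [qItem], []) else some (qList, qItem))
      else if rest.isEmpty then
        (let qi := qItem ++ [arg]
         if qi.length < 4 then none else some (qList ++ [qi], []))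
      else some (qList, qItem)
    match st with
    | none => none
    | some (qList', qItem') =>
      pvLoopA rest qList' (qItem' ++ [arg])
        (level + (if arg.toList.all (· == '(') then (arg.toList.length : Int) else 0)
               - (if arg.toList.all (· == ')') then (arg.toList.length : Int) else 0))

-- A's final check after the loop
def pvFinishA : Option (List (List String) × List String × Int) → Option (List (List String))
  | none => none
  | some (qList, qItem, level) =>
    if 1 < qItem.length ∨ level ≠ 0 ∨
        qList.any (fun q => decide (6 < q.length) || decide (q.length < 4)) then none
    else some qList

def query_split (args : List String) : Option (List (List String)) :=
  match args with
  | [] => none  -- Python: `args[0]` raises IndexError here; excluded by Pre_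
  | a0 :: _ =>
    let args1 := if pvConn a0 then args else "and" :: args
    pvFinishA (pvLoopA args1 [] [] 0)

-- ===== PORT B =====
-- Source B's list comprehension `[toks[a:b] for a, b in zip(bounds, bounds[1:])]`
-- (toks[a:b] = drop/take: exact, since every recorded bound satisfies 0 ≤ a ≤ b ≤ len toks)
def pvSegs (toks : List String) (bounds : List Nat) : List (List String) :=
  (bounds.zip bounds.tail).map (fun p => (toks.drop p.1).take (p.2 - p.1))

-- Source B's single scan: records group-start boundaries and the bracket level.
-- (`i - starts[-1]` is never negative in Source B — starts only holds positions ≤ i — so Nat subtraction is exact)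
def pvScanB : List String → Nat → List Nat → Int → (List Nat × Int)
  | [], _, starts, level => (starts, level)
  | tok :: rest, i, starts, level =>
    let nxtConn : Bool := match rest.head? with | some a => pvConn a | none => false
    let starts' := if pvConn tok && !nxtConn && 4 ≤ i - starts.getLastD 0 then starts ++ [i] else starts
    let level' :=
      if tok ≠ "" ∧ tok.toList.all (· == '(') then level + (tok.toList.length : Int)
      else if tok ≠ "" ∧ tok.toList.all (· == ')') then level - (tok.toList.length : Int)
      else level
    pvScanB rest (i + 1) starts' level'

-- Source B after the scan: slice into groups, handle a trailing connector, validate.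
def pvFinishB (toks : List String) (p : List Nat × Int) : Option (List (List String)) :=
  let n := toks.length
  let groups := pvSegs toks (p.1 ++ [n])
  let check : List (List String) → Option (List (List String)) := fun gs =>
    if p.2 ≠ 0 ∨ gs.any (fun g => !(decide (4 ≤ g.length) && decide (g.length ≤ 6))) then none
    else some gs
  if pvConn (toks.getLastD "") then
    if p.1.getLastD 0 ≠ n - 1 then none else check groups.dropLast
  else check groups

def query_split_alt (args : List String) : Option (List (List String)) :=
  match args with
  | [] => none  -- Python: `toks[0]` raises IndexError here; excluded by Pre_
  | a0 :: _ =>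
    let toks := if pvConn a0 then args else "and" :: args
    pvFinishB toks (pvScanB toks 0 [0] 0)

-- ===== PRECONDITION & SPEC =====
-- Pre_ excludes only the empty list, on which A (and B) raise IndexError at `args[0]`.
def Pre_query_split (args : List String) : Prop := args ≠ []
instance (args : List String) : Decidable (Pre_query_split args) := by unfold Pre_query_split; infer_instance
def pvWitness_query_split : List String := ["and", "a", "b", "c"]

def Spec_query_split (args : List String) (out : Option (List (List String))) : Prop := out = query_split_alt args
instance (args : List String) (out : Option (List (List String))) : Decidable (Spec_query_split args out) := by unfold Spec_query_split; infer_instance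

-- ===== CLAIM (what is proved, stated in full; the proofs are below) =====
def Claim_equal_query_split : Prop := ∀ (args : List String), Dom_query_split args → Pre_query_split args → Spec_query_split args (query_split args)

-- ===== LEMMAS AND PROOFS =====

-- the two "group length out of [4,6]" predicates agree
lemma pvBad_eq (gs : List (List String)) :
    gs.any (fun q => decide (6 < q.length) || decide (q.length < 4))
      = gs.any (fun g => !(decide (4 ≤ g.length) && decide (g.length ≤ 6))) := by
  have : (fun q : List String => decide (6 < q.length) || decide (q.length < 4))
      = (fun g : List String => !(decide (4 ≤ g.length) && decide (g.length ≤ 6))) := by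
    funext g
    by_cases h4 : 4 ≤ g.length <;> by_cases h6 : g.length ≤ 6 <;> simp [h4, h6] <;> omega
  rw [this]

-- A's level update equals B's level update
lemma pvLevel_eq (arg : String) (level : Int) :
    (level + (if arg.toList.all (· == '(') then (arg.toList.length : Int) else 0)
           - (if arg.toList.all (· == ')') then (arg.toList.length : Int) else 0))
    = (if arg ≠ "" ∧ arg.toList.all (· == '(') then level + (arg.toList.length : Int)
       else if arg ≠ "" ∧ arg.toList.all (· == ')') then level - (arg.toList.length : Int)
       else level) := by
  by_cases he : arg = ""
  · subst he; simp
  · have hne : arg.toList ≠ [] := by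
      intro h; exact he (String.toList_eq_nil_iff.mp h)
    by_cases h1 : arg.toList.all (· == '(') <;> by_cases h2 : arg.toList.all (· == ')')
    · exfalso
      match hl : arg.toList with
      | [] => exact hne hl
      | c :: cs =>
        rw [hl] at h1 h2
        simp [List.all_cons] at h1 h2
        rw [h1.1] at h2; exact absurd h2.1 (by decide)
    · simp [he, h1, h2]
    · simp [he, h1, h2]
    · simp [he, h1, h2]

lemma pvSegs_append_last (toks : List String) (bs : List Nat) (s j : Nat)
    (h : bs.getLast? = some s) :
    pvSegs toks (bs ++ [j]) = pvSegs toks bs ++ [(toks.drop s).take (j - s)] := by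
  induction bs with
  | nil => simp at h
  | cons a t ih =>
    cases t with
    | nil =>
      simp at h; subst h; simp [pvSegs]
    | cons b u =>
      have h' : (b :: u).getLast? = some s := by simpa using h
      have e := ih h'
      simp only [pvSegs, List.cons_append, List.zip_cons_cons, List.tail_cons, List.map_cons] at e ⊢
      rw [e]

-- the main loop correspondence
lemma pvLoop_eq (toks : List String) :
    ∀ (rest : List String) (i : Nat) (starts : List Nat) (s : Nat)
      (qList : List (List String)) (level : Int),
      rest ≠ [] →
      i + rest.length = toks.length →
      rest = toks.drop i →
      starts.getLast? = some s →
      s ≤ i →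
      qList = pvSegs toks starts →
      pvFinishA (pvLoopA rest qList ((toks.drop s).take (i - s)) level)
        = pvFinishB toks (pvScanB rest i starts level) := by
  intro rest
  induction rest with
  | nil => intro _ _ _ _ _ h1 _ _ _ _ _; exact absurd rfl h1
  | cons arg rest ih =>
    intro i starts s qList level _ hlen hdrop hlast hsi hql
    have hget : toks[i]? = some arg := by
      rw [← List.head?_drop, ← hdrop]; rfl
    have hilt : i < toks.length := by
      simp only [List.length_cons] at hlen; omega
    have hdrop' : toks.drop (i + 1) = rest := by
      rw [← List.tail_drop, ← hdrop, List.tail_cons]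
    have hlastD : starts.getLastD 0 = s := by
      rw [List.getLastD_eq_getLast?, hlast]; rfl
    have hqlen : ((toks.drop s).take (i - s)).length = i - s := by
      simp [List.length_take, List.length_drop]; omega
    have htake : (toks.drop s).take (i - s) ++ [arg] = (toks.drop s).take (i + 1 - s) := by
      rw [show i + 1 - s = (i - s) + 1 by omega, List.take_add_one]
      have hg : (toks.drop s)[i - s]? = some arg := by
        rw [List.getElem?_drop, show s + (i - s) = i by omega]; exact hget
      simp [hg]
    cases rest with
    | nil =>
      -- last iteration: i + 1 = toks.length
      have hn : toks.length = i + 1 := by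
        simp only [List.length_cons, List.length_nil] at hlen; omega
      have hlastTok : toks.getLastD "" = arg := by
        rw [List.getLastD_eq_getLast?, List.getLast?_eq_getElem?, hn,
          Nat.add_sub_cancel, hget]; rfl
      have htk1 : (toks.drop i).take ((i + 1) - i) = [arg] := by
        rw [show (i + 1) - i = 1 by omega, ← hdrop]; rfl
      have htkn : (toks.drop s).take (toks.length - s) = (toks.drop s).take (i - s) ++ [arg] := by
        rw [htake, hn]
      simp only [pvLoopA, pvScanB, List.head?_nil, List.isEmpty_nil, hlastD, hqlen]
      rw [← pvLevel_eq arg level]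
      generalize (level + (if arg.toList.all (· == '(') then (arg.toList.length : Int) else 0)
               - (if arg.toList.all (· == ')') then (arg.toList.length : Int) else 0)) = L
      by_cases hc : pvConn arg = true
      · by_cases h4 : 4 ≤ i - s
        · -- trailing connector, flush at the last position
          have hsegs1 : pvSegs toks (starts ++ [i, i + 1])
              = (qList ++ [(toks.drop s).take (i - s)]) ++ [[arg]] := by
            rw [show (starts ++ [i, i + 1] : List Nat) = (starts ++ [i]) ++ [i + 1] by simp,
              pvSegs_append_last toks (starts ++ [i]) i (i + 1) List.getLast?_concat,
              htk1, pvSegs_append_last toks starts s i hlast, hql]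
          simp only [hc, h4, decide_true, Bool.and_true, Bool.not_false, if_pos,
            pvFinishA, pvFinishB, hlastTok, hn,
            List.getLastD_eq_getLast?, List.getLast?_concat, Option.getD_some, Nat.add_sub_cancel,
            List.nil_append]
          rw [pvBad_eq]
          simp [hsegs1]
        · -- trailing connector, no flush
          simp only [hc, h4, decide_false, Bool.and_false, if_false,
            pvFinishA, pvFinishB, hlastTok, List.getLastD_eq_getLast?,
            hn, Nat.add_sub_cancel]
          simp only [Bool.not_false, Bool.and_true, Bool.false_eq_true, if_true, if_false,
            hlast, Option.getD_some]
          rcases eq_or_lt_of_le hsi with hse | hsl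
          · subst hse
            have hsegs2 : pvSegs toks (starts ++ [s + 1]) = qList ++ [[arg]] := by
              rw [pvSegs_append_last toks starts s (s + 1) hlast, htk1, hql]
            rw [pvBad_eq]
            simp [hsegs2]
          · have hgt : 1 < ((toks.drop s).take (i - s) ++ [arg]).length := by
              rw [List.length_append, hqlen]; simp; omega
            rw [if_pos (Or.inl hgt), if_pos (show s ≠ i by omega)]
      · -- last token is not a connector
        have hsegs3 : pvSegs toks (starts ++ [i + 1])
            = qList ++ [(toks.drop s).take (i - s) ++ [arg]] := by
          rw [pvSegs_append_last toks starts s (i + 1) hlast, ← htake, hql]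
        simp only [hc, pvFinishA, pvFinishB, hlastTok,
          List.getLastD_eq_getLast?, hlast, Option.getD_some, hn, Nat.add_sub_cancel,
          Bool.not_false, Bool.and_true, Bool.false_and, Bool.false_eq_true,
          if_true, if_false, hsegs3]
        by_cases h4' : ((toks.drop s).take (i - s) ++ [arg]).length < 4
        · rw [if_pos h4']
          have hb2 : ((qList ++ [(toks.drop s).take (i - s) ++ [arg]]).any fun g =>
              !(decide (4 ≤ g.length) && decide (g.length ≤ 6))) = true := by
            simp only [List.any_append, List.any_cons, List.any_nil, Bool.or_false,
              Bool.or_eq_true, Bool.not_eq_true', Bool.and_eq_false_iff, decide_eq_false_iff_not]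
            right
            left
            omega
          rw [if_pos (Or.inr hb2)]
        · rw [if_neg h4']
          simp [pvBad_eq]
          have hx : (6 ≤ i - s ∧ 6 ≤ toks.length - s ∨ min (i - s) (toks.length - s) + 1 < 4)
              ↔ ((i - s < 3 ∨ toks.length - s < 3) ∨ 6 ≤ i - s ∧ 6 ≤ toks.length - s) := by
            rw [hn]; omega
          simp only [hx]
    | cons arg1 t =>
      have hne : (arg1 :: t : List String) ≠ [] := by simp
      have hlen' : (i + 1) + (arg1 :: t).length = toks.length := by
        simp only [List.length_cons] at hlen ⊢; omega
      have htk1 : (toks.drop i).take ((i + 1) - i) = [arg] := by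
        rw [show (i + 1) - i = 1 by omega, ← hdrop]; rfl
      simp only [pvLoopA, pvScanB, List.head?_cons, List.isEmpty_cons, hlastD, hqlen]
      rw [← pvLevel_eq arg level]
      generalize (level + (if arg.toList.all (· == '(') then (arg.toList.length : Int) else 0)
               - (if arg.toList.all (· == ')') then (arg.toList.length : Int) else 0)) = L
      by_cases hb : (pvConn arg && !pvConn arg1) = true
      · by_cases h4 : 4 ≤ i - s
        · simp only [hb, h4, decide_true, Bool.and_true, if_pos, List.nil_append]
          have e := ih (i + 1) (starts ++ [i]) i
              (qList ++ [(toks.drop s).take (i - s)]) L hne hlen' hdrop'.symm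
              List.getLast?_concat (by omega)
              (by rw [hql, pvSegs_append_last toks starts s i hlast])
          rw [htk1] at e
          exact e
        · simp only [hb, h4, decide_false, Bool.and_false, if_false, if_true]
          have e := ih (i + 1) starts s qList L hne hlen' hdrop'.symm hlast (by omega) hql
          rw [← htake] at e
          exact e
      · simp only [hb, Bool.false_and]
        have e := ih (i + 1) starts s qList L hne hlen' hdrop'.symm hlast (by omega) hql
        rw [← htake] at e
        exact e

lemma pvGlue (toks : List String) (h : toks ≠ []) :
    pvFinishA (pvLoopA toks [] [] 0) = pvFinishB toks (pvScanB toks 0 [0] 0) := by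
  have e := pvLoop_eq toks toks 0 [0] 0 [] 0 h (by simp) (by simp) rfl (Nat.le_refl 0) rfl
  simpa using e

-- ===== VERDICT (by name: the statement is the Claim_ definition above) =====
theorem query_split_spec : Claim_equal_query_split := by
  intro args _ hpre
  unfold Spec_query_split
  match args with
  | [] => exact absurd rfl hpre
  | a0 :: t =>
    simp only [query_split, query_split_alt]
    by_cases hconn : pvConn a0 = true <;>
      simp only [hconn, if_true, if_false, Bool.false_eq_true]
    · exact pvGlue (a0 :: t) (by simp)
    · exact pvGlue ("and" :: a0 :: t) (by simp)
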